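-- pv_equiv track=rewrite | github.com/jh27kim/Algorithm | WallRepair.py | check
-- ===== SOURCE A (Python) =====
-- def check(w1, w2):
--     move = True
--     for i in range(len(w1)):
--         if w1[i] != w2[i]:
--             if not move:
--                 return False
--             move = False
--     return True
-- ===== SOURCE B (Python) =====
-- def check(w1, w2):
--     n = len(w1)
--     i = 0
--     while i < n and w1[i] == w2[i]:
--         i += 1
--     if i == n:
--         return True
--     return w1[i+1:] == w2[i+1:n]
-- ===== Notes on version B (the rewrite author's own statement) =====
-- stated objective: alternative
-- what changed: Replaced the flag-carrying full index loop by a two-stage decomposition: scan off the common prefix, then decide the answer by a single slice-equality comparison of the suffixes after the first mismatch.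
import Mathlib
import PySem

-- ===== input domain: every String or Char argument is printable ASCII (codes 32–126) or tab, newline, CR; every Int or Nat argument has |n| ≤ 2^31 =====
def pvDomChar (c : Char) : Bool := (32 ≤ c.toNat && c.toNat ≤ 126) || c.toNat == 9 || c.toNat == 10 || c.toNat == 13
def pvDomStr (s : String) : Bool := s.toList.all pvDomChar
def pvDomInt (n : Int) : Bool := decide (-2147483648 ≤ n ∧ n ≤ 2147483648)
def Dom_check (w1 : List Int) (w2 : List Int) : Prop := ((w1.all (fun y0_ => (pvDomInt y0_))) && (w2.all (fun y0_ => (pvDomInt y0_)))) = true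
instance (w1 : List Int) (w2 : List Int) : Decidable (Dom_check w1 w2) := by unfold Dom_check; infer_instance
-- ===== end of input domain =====

-- B replaces A's flag-carrying full index loop by two stages: scan off the common prefix, then
-- decide by one slice-equality comparison of the suffixes after the first mismatch (objective: alternative).

-- ===== PORT A =====
def checkGo (w1 w2 : List Int) : List Int → Bool → Bool
  | [], _ => true
  | i :: rest, move =>
    if PySem.List.pyGetD w1 i 0 ≠ PySem.List.pyGetD w2 i 0 then
      if !move then false
      else checkGo w1 w2 rest false
    else checkGo w1 w2 rest move

def check (w1 : List Int) (w2 : List Int) : Bool :=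
  checkGo w1 w2 (PySem.List.pyRange 0 (w1.length : Int) 1) true

-- ===== PORT B =====
-- B's while loop: advance i while i < n and w1[i] == w2[i]; fuel d = n - i makes it structural.
def scanGo (w1 w2 : List Int) : Nat → Nat → Nat
  | i, 0 => i
  | i, d + 1 =>
    if PySem.List.pyGetD w1 (i : Int) 0 = PySem.List.pyGetD w2 (i : Int) 0 then
      scanGo w1 w2 (i + 1) d
    else i

def check_alt (w1 : List Int) (w2 : List Int) : Bool :=
  let n := w1.length
  let i := scanGo w1 w2 0 n
  if i = n then true
  else
    decide (PySem.List.slice w1 (some ((i : Int) + 1)) none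
          = PySem.List.slice w2 (some ((i : Int) + 1)) (some (n : Int)))

-- ===== PRECONDITION & SPEC =====
-- Pre_ excludes exactly the inputs where A raises IndexError: w2 shorter than w1 and fewer than
-- two mismatches among the overlapping positions (so A's loop reaches an out-of-range index of w2).
def Pre_check (w1 : List Int) (w2 : List Int) : Prop :=
  w1.length ≤ w2.length ∨ 2 ≤ (w1.zip w2).countP (fun p => decide (p.1 ≠ p.2))
instance (w1 : List Int) (w2 : List Int) : Decidable (Pre_check w1 w2) := by unfold Pre_check; infer_instance

def pvWitness_check : List Int × List Int := ([1, 2], [1, 3, 5])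

def Spec_check (w1 : List Int) (w2 : List Int) (out : Bool) : Prop := out = check_alt w1 w2
instance (w1 : List Int) (w2 : List Int) (out : Bool) : Decidable (Spec_check w1 w2 out) := by unfold Spec_check; infer_instance

-- ===== CLAIM (what is proved, stated in full; the proofs are below) =====
def Claim_equal_check : Prop := ∀ (w1 : List Int) (w2 : List Int), Dom_check w1 w2 → Pre_check w1 w2 → Spec_check w1 w2 (check w1 w2)

-- ===== LEMMAS AND PROOFS =====

-- A's loop decides "count of mismatching indices ≤ (1 if move else 0)".
lemma go_eq (w1 w2 : List Int) : ∀ (d k : Nat) (move : Bool), k + d = w1.length →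
    checkGo w1 w2 (PySem.List.pyRange (k : Int) (w1.length : Int) 1) move
      = decide ((PySem.List.pyRange (k : Int) (w1.length : Int) 1).countP
          (fun i => decide (PySem.List.pyGetD w1 i 0 ≠ PySem.List.pyGetD w2 i 0))
          ≤ (if move then 1 else 0)) := by
  intro d
  induction d with
  | zero =>
      intro k move hk
      rw [PySem.List.pyRange_one_eq_nil (by omega)]
      cases move <;> simp [checkGo]
  | succ d ih =>
      intro k move hk
      have hlt : (k : Int) < (w1.length : Int) := by exact_mod_cast (by omega : k < w1.length)
      rw [PySem.List.pyRange_one_cons hlt]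
      have hcast : ((k : Int) + 1) = ((k + 1 : Nat) : Int) := by push_cast; ring
      simp only [checkGo, List.countP_cons]
      rw [hcast, ih (k + 1) move (by omega), ih (k + 1) false (by omega)]
      by_cases hm : PySem.List.pyGetD w1 (k : Int) 0 ≠ PySem.List.pyGetD w2 (k : Int) 0
      · cases move <;>
          · rw [if_pos hm]
            simp only [decide_eq_true_eq, Bool.not_false, Bool.not_true, if_true, if_false,
              Bool.false_eq_true, Bool.true_eq_false, eq_self_iff_true]
            rw [if_pos hm]
            first
              | (symm; rw [decide_eq_false_iff_not]; omega)
              | (rw [decide_eq_decide]; omega)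
      · rw [if_neg hm]
        simp only [hm, decide_false, Bool.false_eq_true, if_false, add_zero]

-- The count of mismatching indices over the overlapping range equals the zip count.
lemma cnt_zip (w1 w2 : List Int) : ∀ (d k : Nat), k + d = min w1.length w2.length →
    (PySem.List.pyRange (k : Int) ((min w1.length w2.length : Nat) : Int) 1).countP
        (fun i => decide (PySem.List.pyGetD w1 i 0 ≠ PySem.List.pyGetD w2 i 0))
      = ((w1.drop k).zip (w2.drop k)).countP (fun p => decide (p.1 ≠ p.2)) := by
  intro d
  induction d with
  | zero =>
      intro k hk
      rw [PySem.List.pyRange_one_eq_nil (by omega)]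
      have hz : ((w1.drop k).zip (w2.drop k)) = [] := by
        apply List.eq_nil_of_length_eq_zero
        simp [List.length_zip]
        omega
      simp [hz]
  | succ d ih =>
      intro k hk
      have hk1 : k < w1.length := by omega
      have hk2 : k < w2.length := by omega
      have hlt : (k : Int) < ((min w1.length w2.length : Nat) : Int) := by
        exact_mod_cast (by omega : k < min w1.length w2.length)
      rw [PySem.List.pyRange_one_cons hlt]
      have hcast : ((k : Int) + 1) = ((k + 1 : Nat) : Int) := by push_cast; ring
      rw [List.countP_cons, hcast, ih (k + 1) (by omega)]
      rw [← List.getElem_cons_drop hk1, ← List.getElem_cons_drop hk2]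
      rw [List.zip_cons_cons, List.countP_cons]
      have h1 : PySem.List.pyGetD w1 (k : Int) 0 = w1[k] := by
        simp [PySem.List.pyGetD_natCast, hk1]
      have h2 : PySem.List.pyGetD w2 (k : Int) 0 = w2[k] := by
        simp [PySem.List.pyGetD_natCast, hk2]
      simp [h1, h2]

-- abbreviation used only in the proofs below
def misCnt (w1 w2 : List Int) (k : Nat) : Nat :=
  (PySem.List.pyRange (k : Int) (w1.length : Int) 1).countP
    (fun i => decide (PySem.List.pyGetD w1 i 0 ≠ PySem.List.pyGetD w2 i 0))

-- B's scan: either it reaches n with no mismatch in [k,n), or it stops at the first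
-- mismatch i, and the mismatch count over [k,n) is 1 + count over (i,n).
lemma scan_spec (w1 w2 : List Int) : ∀ (d k : Nat), k + d = w1.length →
    (k ≤ scanGo w1 w2 k d ∧ scanGo w1 w2 k d ≤ w1.length) ∧
    (if scanGo w1 w2 k d = w1.length then misCnt w1 w2 k = 0
     else misCnt w1 w2 k = 1 + misCnt w1 w2 (scanGo w1 w2 k d + 1)) := by
  intro d
  induction d with
  | zero =>
      intro k hk
      have hkn : k = w1.length := by omega
      simp only [scanGo, hkn, if_pos rfl]
      refine ⟨⟨le_refl _, le_refl _⟩, ?_⟩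
      unfold misCnt
      rw [PySem.List.pyRange_one_eq_nil (by omega)]
      simp
  | succ d ih =>
      intro k hk
      have hlt : (k : Int) < (w1.length : Int) := by exact_mod_cast (by omega : k < w1.length)
      have hcast : ((k : Int) + 1) = ((k + 1 : Nat) : Int) := by push_cast; ring
      have hcnt : misCnt w1 w2 k
          = (if PySem.List.pyGetD w1 (k : Int) 0 ≠ PySem.List.pyGetD w2 (k : Int) 0 then 1 else 0)
            + misCnt w1 w2 (k + 1) := by
        unfold misCnt
        rw [PySem.List.pyRange_one_cons hlt, List.countP_cons, hcast]
        rcases eq_or_ne (PySem.List.pyGetD w1 (k : Int) 0) (PySem.List.pyGetD w2 (k : Int) 0) with h | h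
        · simp [h]
        · simp [h]
          omega
      by_cases heq : PySem.List.pyGetD w1 (k : Int) 0 = PySem.List.pyGetD w2 (k : Int) 0
      · have hs : scanGo w1 w2 k (d + 1) = scanGo w1 w2 (k + 1) d := by
          simp only [scanGo]
          rw [if_pos heq]
        have hmk : misCnt w1 w2 k = misCnt w1 w2 (k + 1) := by
          rw [hcnt, if_neg (fun h => h heq), Nat.zero_add]
        obtain ⟨⟨h1, h2⟩, h3⟩ := ih (k + 1) (by omega)
        rw [hs, hmk]
        exact ⟨⟨by omega, h2⟩, h3⟩
      · have hs : scanGo w1 w2 k (d + 1) = k := by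
          simp only [scanGo]
          rw [if_neg heq]
        rw [hs, if_neg (by omega), hcnt, if_pos heq]
        exact ⟨⟨le_refl _, by omega⟩, by omega⟩

-- zero mismatch count over [a, n) ↔ the suffixes (w2 cut at n) agree, when n ≤ |w2|.
lemma cnt_zero_iff_suffix_eq (w1 w2 : List Int) (hle : w1.length ≤ w2.length) :
    ∀ (d a : Nat), a + d = w1.length →
    (misCnt w1 w2 a = 0 ↔ w1.drop a = (w2.take w1.length).drop a) := by
  intro d
  induction d with
  | zero =>
      intro a ha
      have han : a = w1.length := by omega
      constructor
      · intro _
        have h1 : w1.drop a = [] := by rw [List.drop_eq_nil_iff]; omega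
        have h2 : (w2.take w1.length).drop a = [] := by
          rw [List.drop_eq_nil_iff]; simp; omega
        rw [h1, h2]
      · intro _
        unfold misCnt
        rw [PySem.List.pyRange_one_eq_nil (by omega)]
        simp
  | succ d ih =>
      intro a ha
      have ha1 : a < w1.length := by omega
      have ha2 : a < w2.length := by omega
      have hat : a < (w2.take w1.length).length := by simp; omega
      have hlt : (a : Int) < (w1.length : Int) := by exact_mod_cast ha1
      have hcast : ((a : Int) + 1) = ((a + 1 : Nat) : Int) := by push_cast; ring
      have hd1 : w1.drop a = w1[a] :: w1.drop (a + 1) := (List.getElem_cons_drop ha1).symm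
      have hd2 : (w2.take w1.length).drop a
          = (w2.take w1.length)[a] :: (w2.take w1.length).drop (a + 1) :=
        (List.getElem_cons_drop hat).symm
      have hg1 : PySem.List.pyGetD w1 (a : Int) 0 = w1[a] := by
        simp [PySem.List.pyGetD_natCast, ha1]
      have hg2 : PySem.List.pyGetD w2 (a : Int) 0 = w2[a] := by
        simp [PySem.List.pyGetD_natCast, ha2]
      have hg2' : (w2.take w1.length)[a] = w2[a] := by
        simp [List.getElem_take]
      have hcnt : misCnt w1 w2 a
          = (if w1[a] ≠ w2[a] then 1 else 0) + misCnt w1 w2 (a + 1) := by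
        unfold misCnt
        rw [PySem.List.pyRange_one_cons hlt, List.countP_cons, hcast, hg1, hg2]
        rcases eq_or_ne w1[a] w2[a] with h | h
        · simp [h]
        · simp [h]
          omega
      rw [hcnt, hd1, hd2, List.cons_eq_cons, hg2']
      by_cases h : w1[a] = w2[a]
      · simp only [h, ne_eq, not_true_eq_false, if_neg, not_false_eq_true, Nat.zero_add,
          ih (a + 1) (by omega), true_and, if_false]
      · rw [if_pos h]
        constructor
        · intro hh
          omega
        · intro hh
          exact absurd hh.1 h

-- ===== VERDICT (by name: the statement is the Claim_ definition above) =====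
theorem check_spec : Claim_equal_check := by
  intro w1 w2 _ hpre
  unfold Spec_check
  have hA := go_eq w1 w2 w1.length 0 true (by omega)
  have hA' : check w1 w2 = decide (misCnt w1 w2 0 ≤ 1) := by
    unfold check misCnt
    simpa using hA
  rw [hA']
  unfold check_alt
  have hscan := scan_spec w1 w2 w1.length 0 (by omega)
  set i := scanGo w1 w2 0 w1.length with hi
  obtain ⟨⟨_, hile⟩, hcnt⟩ := hscan
  by_cases hin : i = w1.length
  · rw [if_pos hin] at hcnt ⊢
    simp [hcnt]
  · rw [if_neg hin] at hcnt ⊢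
    rw [hcnt]
    have hi1 : i + 1 ≤ w1.length := by omega
    by_cases hle : w1.length ≤ w2.length
    · -- suffix equality via cnt_zero_iff_suffix_eq
      have hiff := cnt_zero_iff_suffix_eq w1 w2 hle (w1.length - (i + 1)) (i + 1) (by omega)
      have hs1 : PySem.List.slice w1 (some ((i : Int) + 1)) none = w1.drop (i + 1) := by
        rw [show ((i : Int) + 1) = (((i + 1 : Nat)) : Int) by push_cast; ring,
          PySem.List.slice_from_natCast]
      have hs2 : PySem.List.slice w2 (some ((i : Int) + 1)) (some (w1.length : Int))
          = (w2.take w1.length).drop (i + 1) := by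
        rw [show ((i : Int) + 1) = (((i + 1 : Nat)) : Int) by push_cast; ring,
          PySem.List.slice_natCast, List.drop_take]
      rw [hs1, hs2]
      rcases Nat.eq_zero_or_pos (misCnt w1 w2 (i + 1)) with hz | hp
      · rw [hz, hiff.mp hz]
        simp
      · have hne : w1.drop (i + 1) ≠ (w2.take w1.length).drop (i + 1) := fun he => by
          have := hiff.mpr he; omega
        simp only [hne, decide_false]
        rw [decide_eq_false_iff_not]
        omega
    · -- w2 shorter; Pre_ gives ≥ 2 mismatches in the overlap: both sides false
      push_neg at hle
      have h2 : 2 ≤ (w1.zip w2).countP (fun p => decide (p.1 ≠ p.2)) := by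
        rcases hpre with h | h
        · omega
        · exact h
      have hmin : min w1.length w2.length = w2.length := by omega
      -- misCnt 0 ≥ 2: split the range at min and use cnt_zip
      have hzip := cnt_zip w1 w2 (min w1.length w2.length) 0 (by omega)
      simp only [List.drop_zero, Nat.cast_zero] at hzip
      have hm_le : min w1.length w2.length ≤ w1.length := by omega
      have hsplit := PySem.List.pyRange_one_append 0 ((min w1.length w2.length : Nat) : Int)
          (w1.length : Int) (by positivity) (by exact_mod_cast hm_le)
      have hc2 : 2 ≤ misCnt w1 w2 0 := by
        unfold misCnt
        simp only [Nat.cast_zero]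
        rw [hsplit, List.countP_append, hzip]
        omega
      have hp1 : 1 ≤ misCnt w1 w2 (i + 1) := by omega
      -- hence i + 1 < w1.length
      have hi2 : i + 1 < w1.length := by
        by_contra hge
        have he : misCnt w1 w2 (i + 1) = 0 := by
          unfold misCnt
          rw [PySem.List.pyRange_one_eq_nil (by exact_mod_cast (by omega : w1.length ≤ i + 1))]
          simp
        omega
      -- B side: the two slices have different lengths
      have hs1 : PySem.List.slice w1 (some ((i : Int) + 1)) none = w1.drop (i + 1) := by
        rw [show ((i : Int) + 1) = (((i + 1 : Nat)) : Int) by push_cast; ring,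
          PySem.List.slice_from_natCast]
      have hs2 : PySem.List.slice w2 (some ((i : Int) + 1)) (some (w1.length : Int))
          = (w2.take w1.length).drop (i + 1) := by
        rw [show ((i : Int) + 1) = (((i + 1 : Nat)) : Int) by push_cast; ring,
          PySem.List.slice_natCast, List.drop_take]
      rw [hs1, hs2]
      have hlen : (w1.drop (i + 1)).length ≠ ((w2.take w1.length).drop (i + 1)).length := by
        simp only [List.length_drop, List.length_take]
        omega
      have hne : w1.drop (i + 1) ≠ (w2.take w1.length).drop (i + 1) := fun he => hlen (by rw [he])
      simp only [hne, decide_false]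
      rw [decide_eq_false_iff_not]
      omega
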